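-- pv_equiv track=rewrite | github.com/darraes/coding_questions | v2/_leet_code_/0053_max_sub_array.py | _max_to_the_right
-- ===== SOURCE A (Python) =====
-- def _max_to_the_right(nums, mid, right):
--     i = mid + 1
--     max_sum = current_sum = 0
--
--     while i <= right:
--         current_sum += nums[i]
--         max_sum = max(max_sum, current_sum)
--         i += 1
--
--     return max_sum
-- ===== SOURCE B (Python) =====
-- def _max_to_the_right(nums, mid, right):
--     # Divide and conquer on the index range: each half reports (total_sum, best_prefix);
--     # halves combine as (ls + rs, max(lp, ls + rp)).
--     def go(lo, hi):
--         if lo > hi: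
--             return (0, 0)
--         if lo == hi:
--             x = nums[lo]
--             return (x, max(0, x))
--         m = (lo + hi) // 2
--         ls, lp = go(lo, m)
--         rs, rp = go(m + 1, hi)
--         return (ls + rs, max(lp, ls + rp))
--     return go(mid + 1, right)[1]
-- ===== Notes on version B (the rewrite author's own statement) =====
-- stated objective: alternative
-- what changed: Replaces the left-to-right running-sum/running-max scan with a divide-and-conquer recursion on the index range that returns (total sum, best prefix) pairs and combines halves via (ls+rs, max(lp, ls+rp)).
import Mathlib
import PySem

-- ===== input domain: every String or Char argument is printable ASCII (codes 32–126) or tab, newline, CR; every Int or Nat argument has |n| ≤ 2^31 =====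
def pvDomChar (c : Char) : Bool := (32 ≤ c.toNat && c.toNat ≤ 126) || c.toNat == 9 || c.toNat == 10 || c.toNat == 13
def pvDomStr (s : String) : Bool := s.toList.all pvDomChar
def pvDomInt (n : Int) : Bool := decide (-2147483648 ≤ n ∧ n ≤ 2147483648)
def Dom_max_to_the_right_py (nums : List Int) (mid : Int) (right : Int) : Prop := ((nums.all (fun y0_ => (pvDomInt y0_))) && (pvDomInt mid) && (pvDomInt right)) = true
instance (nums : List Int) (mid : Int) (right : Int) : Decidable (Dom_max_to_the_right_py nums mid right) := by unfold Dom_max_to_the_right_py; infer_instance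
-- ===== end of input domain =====

-- B replaces A's left-to-right running-sum/running-max scan with a divide-and-conquer recursion returning (sum, best-prefix) pairs; same cost, different algorithm (objective: alternative).


-- ===== PORT A =====
-- A's while-loop; nums[i] is pyGet? (Pre_ guarantees it is in range wherever the loop body runs)
def maxRightLoop (nums : List Int) (right : Int) (i maxSum currentSum : Int) : Int :=
  if i ≤ right then
    let c := currentSum + (PySem.List.pyGet? nums i).getD 0
    maxRightLoop nums right (i + 1) (max maxSum c) c
  else maxSum
termination_by (right + 1 - i).toNat
decreasing_by omega

def max_to_the_right_py (nums : List Int) (mid : Int) (right : Int) : Int :=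
  maxRightLoop nums right (mid + 1) 0 0

-- ===== PORT B =====
-- midpoint bound, cited by goAux's decreasing_by
theorem goMid_bounds {lo hi : Int} (h : lo < hi) :
    lo ≤ PySem.Int.floordiv (lo + hi) 2 ∧ PySem.Int.floordiv (lo + hi) 2 < hi := by
  have h1 := (PySem.Int.floordiv_two_mid_bounds (lo := lo) (hi := hi) (by omega)).1
  have h2 : PySem.Int.floordiv (lo + hi) 2 < hi := by
    rw [PySem.Int.floordiv_lt_iff_lt_mul (by omega : (0:Int) < 2)]; omega
  exact ⟨h1, h2⟩

-- go(lo, hi) of Source B: (total sum, best prefix incl. empty) over indices lo..hi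
def goAux (nums : List Int) (lo hi : Int) : Int × Int :=
  if hi < lo then (0, 0)
  else if lo = hi then
    let x := (PySem.List.pyGet? nums lo).getD 0
    (x, max 0 x)
  else
    let m := PySem.Int.floordiv (lo + hi) 2
    let l := goAux nums lo m
    let r := goAux nums (m + 1) hi
    (l.1 + r.1, max l.2 (l.1 + r.2))
termination_by (hi - lo).toNat
decreasing_by
  · have := goMid_bounds (show lo < hi by omega); omega
  · have := goMid_bounds (show lo < hi by omega); omega

def max_to_the_right_py_alt (nums : List Int) (mid : Int) (right : Int) : Int :=
  (goAux nums (mid + 1) right).2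

-- ===== PRECONDITION & SPEC =====
-- Pre_ = exactly the inputs on which the Python A returns (no IndexError): the range mid+1..right
-- is empty, or all its indices are valid Python indices of nums (negative wraparound allowed).
def Pre_max_to_the_right_py (nums : List Int) (mid : Int) (right : Int) : Prop :=
  right < mid + 1 ∨ (-(nums.length : Int) ≤ mid + 1 ∧ right < (nums.length : Int))
instance (nums : List Int) (mid : Int) (right : Int) : Decidable (Pre_max_to_the_right_py nums mid right) := by unfold Pre_max_to_the_right_py; infer_instance

def pvWitness_max_to_the_right_py : List Int × Int × Int := ([1, -2, 3], 0, 2)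

def Spec_max_to_the_right_py (nums : List Int) (mid : Int) (right : Int) (out : Int) : Prop := out = max_to_the_right_py_alt nums mid right
instance (nums : List Int) (mid : Int) (right : Int) (out : Int) : Decidable (Spec_max_to_the_right_py nums mid right out) := by unfold Spec_max_to_the_right_py; infer_instance

-- ===== CLAIM (what is proved, stated in full; the proofs are below) =====
def Claim_equal_max_to_the_right_py : Prop := ∀ (nums : List Int) (mid : Int) (right : Int), Dom_max_to_the_right_py nums mid right → Pre_max_to_the_right_py nums mid right → Spec_max_to_the_right_py nums mid right (max_to_the_right_py nums mid right)

-- ===== LEMMAS AND PROOFS =====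

-- the element A and B both read at index i (0 for out-of-range; Pre_ keeps that unreachable)
def gVal (nums : List Int) (i : Int) : Int := (PySem.List.pyGet? nums i).getD 0

-- best prefix sum (incl. the empty prefix) of the k elements starting at index i
def F (nums : List Int) : Nat → Int → Int
  | 0, _ => 0
  | k + 1, i => max 0 (gVal nums i + F nums k (i + 1))

-- sum of the k elements starting at index i
def S (nums : List Int) : Nat → Int → Int
  | 0, _ => 0
  | k + 1, i => gVal nums i + S nums k (i + 1)

theorem F_nonneg (nums : List Int) (k : Nat) (i : Int) : 0 ≤ F nums k i := by
  cases k with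
  | zero => simp [F]
  | succ k => simp [F]

theorem S_split (nums : List Int) (a b : Nat) :
    ∀ i, S nums (a + b) i = S nums a i + S nums b (i + a) := by
  induction a with
  | zero => intro i; simp [S]
  | succ a ih =>
    intro i
    have h : a + 1 + b = (a + b) + 1 := by omega
    rw [h]
    simp only [S, ih (i + 1)]
    have : i + 1 + (a : Int) = i + (a + 1 : Nat) := by push_cast; ring
    rw [this]
    ring

theorem F_split (nums : List Int) (a b : Nat) :
    ∀ i, F nums (a + b) i = max (F nums a i) (S nums a i + F nums b (i + a)) := by
  induction a with
  | zero =>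
    intro i
    have := F_nonneg nums b i
    simp [F, S]
    omega
  | succ a ih =>
    intro i
    have h : a + 1 + b = (a + b) + 1 := by omega
    rw [h]
    simp only [F, S, ih (i + 1)]
    have hc : i + 1 + (a : Int) = i + (a + 1 : Nat) := by push_cast; ring
    rw [hc]
    omega

-- B's divide and conquer computes (sum, best prefix) of its range
theorem goAux_spec (nums : List Int) :
    ∀ (k : Nat) (lo hi : Int), (hi + 1 - lo).toNat ≤ k →
      goAux nums lo hi = (S nums (hi + 1 - lo).toNat lo, F nums (hi + 1 - lo).toNat lo) := by
  intro k
  induction k with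
  | zero =>
    intro lo hi hk
    have hlt : hi < lo := by omega
    have h0 : (hi + 1 - lo).toNat = 0 := by omega
    rw [goAux, if_pos hlt, h0]
    simp [S, F]
  | succ k ih =>
    intro lo hi hk
    by_cases hlt : hi < lo
    · have h0 : (hi + 1 - lo).toNat = 0 := by omega
      rw [goAux, if_pos hlt, h0]
      simp [S, F]
    · by_cases heq : lo = hi
      · have h1 : (hi + 1 - lo).toNat = 1 := by omega
        rw [goAux, if_neg hlt, if_pos heq, h1]
        simp [S, F, gVal, heq]
      · have hlohi : lo < hi := by omega
        have hm := goMid_bounds hlohi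
        rw [goAux, if_neg hlt, if_neg heq]
        set m := PySem.Int.floordiv (lo + hi) 2 with hmdef
        have ha : (m + 1 - lo).toNat ≤ k := by omega
        have hb : (hi + 1 - (m + 1)).toNat ≤ k := by omega
        dsimp only
        rw [ih lo m ha, ih (m + 1) hi hb]
        have hsplit : (hi + 1 - lo).toNat = (m + 1 - lo).toNat + (hi + 1 - (m + 1)).toNat := by
          omega
        have hidx : lo + ((m + 1 - lo).toNat : Int) = m + 1 := by omega
        rw [hsplit, S_split nums _ _ lo, F_split nums _ _ lo, hidx]
  -- result follows definitionally

-- A's loop computes max m (c + best prefix from i)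
theorem loopA_eq (nums : List Int) (right : Int) :
    ∀ (k : Nat) (i m c : Int), (right + 1 - i).toNat = k → c ≤ m →
      maxRightLoop nums right i m c = max m (c + F nums k i) := by
  intro k
  induction k with
  | zero =>
    intro i m c hk hcm
    rw [maxRightLoop, if_neg (by omega)]
    simp [F]
    omega
  | succ k ih =>
    intro i m c hk hcm
    have hir : i ≤ right := by omega
    rw [maxRightLoop, if_pos hir]
    dsimp only
    simp only [show (PySem.List.pyGet? nums i).getD 0 = gVal nums i from rfl]
    rw [ih (i + 1) (max m (c + gVal nums i)) (c + gVal nums i) (by omega) (le_max_right _ _)]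
    simp only [F]
    have := F_nonneg nums k (i + 1)
    unfold gVal
    omega

-- ===== VERDICT (by name: the statement is the Claim_ definition above) =====
theorem max_to_the_right_py_spec : Claim_equal_max_to_the_right_py := by
  intro nums mid right _ _
  unfold Spec_max_to_the_right_py max_to_the_right_py max_to_the_right_py_alt
  rw [goAux_spec nums (right + 1 - (mid + 1)).toNat (mid + 1) right le_rfl]
  rw [loopA_eq nums right (right + 1 - (mid + 1)).toNat (mid + 1) 0 0 rfl le_rfl]
  have := F_nonneg nums (right + 1 - (mid + 1)).toNat (mid + 1)
  omega
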